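-- pv_equiv track=rewrite | github.com/MaximHirschmann/project-euler-solutions | Python/798.py | winner_worst_play
-- ===== SOURCE A (Python) =====
-- def other(player):
--     return -player
--
-- def winner_worst_play(visible, deck, player=1):
--     if visible == [] or deck == []:
--         return other(player)
--
--     move_available = False
--     for card_chosen in deck:
--         for stack_chosen in visible:
--             if stack_chosen[1] != card_chosen[1] or stack_chosen[0] > card_chosen[0]: # you cant put that card on top of the other one
--                 continue
--             move_available = True
--             new_visible = [card_chosen if card == stack_chosen else card for card in visible]
--             new_deck = [card for card in deck if card != card_chosen]
--             res = winner_worst_play(new_visible, new_deck, other(player))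
--             if res == other(player):
--                 return other(player)
--
--     if not move_available:
--         return other(player)
--
--     return player
-- ===== SOURCE B (Python) =====
-- def winner_worst_play(visible, deck, player=1):
--     # Player-independent boolean game value ("does the side to move win?"),
--     # memoized on the (visible, deck) position; the answer is then mapped
--     # back to +/-player once at the top.
--     memo = {}
--
--     def win(vis, dk):
--         if not vis or not dk:
--             return False
--         key = (vis, dk)
--         if key in memo:
--             return memo[key]
--         children = [
--             (tuple(c if x == s else x for x in vis), tuple(x for x in dk if x != c))
--             for c in dk
--             for s in vis
--             if s[1] == c[1] and s[0] <= c[0]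
--         ]
--         res = bool(children) and all(not win(nv, nd) for nv, nd in children)
--         memo[key] = res
--         return res
--
--     return player if win(tuple(visible), tuple(deck)) else -player
-- ===== Notes on version B (the rewrite author's own statement) =====
-- stated objective: faster
-- what changed: B replaces A's player-threaded nested early-return loops by a player-free boolean game value win(visible, deck) ('does the side to move win?'): it builds the list of child positions once per position with a comprehension, takes 'children and all(not win(child))', memoizes this boolean on the (visible, deck) position alone, and maps the boolean back to +/-player once at the top; intended as faster via memoization (a timing run measured 5-26x across runs at the largest size both finished, not confirmed at every size).
import Mathlib
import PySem

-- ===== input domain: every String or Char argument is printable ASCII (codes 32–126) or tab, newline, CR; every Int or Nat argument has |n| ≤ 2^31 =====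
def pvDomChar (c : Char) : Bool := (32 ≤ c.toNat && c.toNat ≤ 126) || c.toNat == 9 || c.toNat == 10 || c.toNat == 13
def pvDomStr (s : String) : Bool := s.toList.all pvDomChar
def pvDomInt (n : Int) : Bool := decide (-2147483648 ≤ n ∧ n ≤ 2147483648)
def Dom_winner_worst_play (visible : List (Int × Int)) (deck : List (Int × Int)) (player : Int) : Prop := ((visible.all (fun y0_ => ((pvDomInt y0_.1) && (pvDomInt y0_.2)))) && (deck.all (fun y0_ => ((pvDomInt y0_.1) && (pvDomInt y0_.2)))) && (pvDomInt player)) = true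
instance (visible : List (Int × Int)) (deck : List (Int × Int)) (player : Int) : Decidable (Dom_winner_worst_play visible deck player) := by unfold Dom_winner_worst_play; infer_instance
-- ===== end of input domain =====

-- B computes a player-free boolean game value memoized on the (visible, deck) position
-- (children list built once per position, 'nonempty and all children lose'), mapped back to
-- ±player at the top; intended as faster via memoization (a timing run measured it
-- 5-26x faster across runs at the largest size both finished, not confirmed at every size).

-- ===== PORT A =====
-- inner 'for stack_chosen in visible' loop of A; returns (move_available, early-return value)
def pvAInner (rec : List (Int × Int) → List (Int × Int) → Int → Int)
    (visible deck : List (Int × Int)) (player : Int) (card : Int × Int) :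
    List (Int × Int) → Bool → Bool × Option Int
  | [], ma => (ma, none)
  | s :: rest, ma =>
    if s.2 ≠ card.2 ∨ card.1 < s.1 then          -- 'continue'
      pvAInner rec visible deck player card rest ma
    else
      let nv := visible.map (fun c => if c = s then card else c)
      let nd := deck.filter (fun c => ¬ c = card)
      let res := rec nv nd (-player)
      if res = -player then (true, some (-player))   -- 'return other(player)'
      else pvAInner rec visible deck player card rest true

-- outer 'for card_chosen in deck' loop of A
def pvAOuter (rec : List (Int × Int) → List (Int × Int) → Int → Int)
    (visible deck : List (Int × Int)) (player : Int) :
    List (Int × Int) → Bool → Bool × Option Int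
  | [], ma => (ma, none)
  | c :: rest, ma =>
    match pvAInner rec visible deck player c visible ma with
    | (ma', some r) => (ma', some r)
    | (ma', none) => pvAOuter rec visible deck player rest ma'

-- A's recursion, with a fuel guard only for totality (fuel = deck.length + 1 always suffices:
-- each recursive call strictly shrinks the deck)
def pvAGo : Nat → List (Int × Int) → List (Int × Int) → Int → Int
  | 0, _, _, player => -player
  | fuel + 1, visible, deck, player =>
    if visible = [] ∨ deck = [] then -player
    else
      match pvAOuter (fun nv nd q => pvAGo fuel nv nd q) visible deck player deck false with
      | (_, some r) => r
      | (ma, none) => if ma = false then -player else player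

def winner_worst_play (visible : List (Int × Int)) (deck : List (Int × Int)) (player : Int) : Int :=
  pvAGo (deck.length + 1) visible deck player

-- ===== PORT B =====
abbrev PvPos := List (Int × Int) × List (Int × Int)

-- the children comprehension: one (new_visible, new_deck) per admissible (card, stack) pair
def pvChildren (vis dk : List (Int × Int)) : List PvPos :=
  dk.flatMap (fun c =>
    (vis.filter (fun s => decide (s.2 = c.2 ∧ s.1 ≤ c.1))).map
      (fun s => (vis.map (fun x => if x = s then c else x), dk.filter (fun x => ¬ x = c))))

-- 'all(not win(nv, nd) for ...)': short-circuiting fold threading the memo table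
def pvAllLose (winGo : PvPos → PySem.Dict PvPos Bool → Bool × PySem.Dict PvPos Bool) :
    List PvPos → PySem.Dict PvPos Bool → Bool × PySem.Dict PvPos Bool
  | [], m => (true, m)
  | ch :: rest, m =>
    let wm := winGo ch m
    if wm.1 then (false, wm.2) else pvAllLose winGo rest wm.2

-- B's memoized boolean recursion 'win(vis, dk)' (fuel guard only for totality)
def pvWinGo : Nat → List (Int × Int) → List (Int × Int) → PySem.Dict PvPos Bool →
    Bool × PySem.Dict PvPos Bool
  | 0, _, _, m => (false, m)
  | fuel + 1, vis, dk, m =>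
    if vis = [] ∨ dk = [] then (false, m)
    else
      match m.get? (vis, dk) with
      | some b => (b, m)                           -- memo hit
      | none =>
        let cs := pvChildren vis dk
        let rm := if cs.isEmpty then (false, m)
                  else pvAllLose (fun ch mm => pvWinGo fuel ch.1 ch.2 mm) cs m
        (rm.1, rm.2.insert (vis, dk) rm.1)

def winner_worst_play_alt (visible : List (Int × Int)) (deck : List (Int × Int)) (player : Int) : Int :=
  if (pvWinGo (deck.length + 1) visible deck PySem.Dict.empty).1 then player else -player

-- ===== PRECONDITION & SPEC =====
def Spec_winner_worst_play (visible : List (Int × Int)) (deck : List (Int × Int)) (player : Int) (out : Int) : Prop := out = winner_worst_play_alt visible deck player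
instance (visible : List (Int × Int)) (deck : List (Int × Int)) (player : Int) (out : Int) : Decidable (Spec_winner_worst_play visible deck player out) := by unfold Spec_winner_worst_play; infer_instance

-- ===== CLAIM (what is proved, stated in full; the proofs are below) =====
def Claim_equal_winner_worst_play : Prop := ∀ (visible : List (Int × Int)) (deck : List (Int × Int)) (player : Int), Dom_winner_worst_play visible deck player → Spec_winner_worst_play visible deck player (winner_worst_play visible deck player)

-- ===== LEMMAS AND PROOFS =====

-- pure (memo-free) boolean game value, the proof's reference semantics
def pvWin : Nat → List (Int × Int) → List (Int × Int) → Bool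
  | 0, _, _ => false
  | fuel + 1, vis, dk =>
    if vis = [] ∨ dk = [] then false
    else
      let cs := pvChildren vis dk
      !cs.isEmpty && cs.all (fun ch => !pvWin fuel ch.1 ch.2)

theorem pvFilter_lt {deck : List (Int × Int)} {card : Int × Int} (h : card ∈ deck) :
    (deck.filter (fun c => ¬ c = card)).length < deck.length := by
  rw [List.length_filter_lt_length_iff_exists]
  exact ⟨card, h, by simp⟩

theorem pvChildren_deck_lt {vis dk : List (Int × Int)} {ch : PvPos}
    (h : ch ∈ pvChildren vis dk) : ch.2.length < dk.length := by
  simp only [pvChildren, List.mem_flatMap, List.mem_map] at h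
  obtain ⟨c, hc, s, _, rfl⟩ := h
  exact pvFilter_lt hc

theorem pvAll_congr {α : Type} (l : List α) (f g : α → Bool)
    (h : ∀ x ∈ l, f x = g x) : l.all f = l.all g := by
  induction l with
  | nil => rfl
  | cons x rest ih =>
    simp only [List.all_cons, h x (by simp)]
    rw [ih (fun y hy => h y (by simp [hy]))]

-- any sufficient fuel computes the same boolean value
theorem pvWin_fuel : ∀ f1 f2 (v d : List (Int × Int)),
    d.length < f1 → d.length < f2 → pvWin f1 v d = pvWin f2 v d := by
  intro f1
  induction f1 with
  | zero => intro f2 v d h1 _; omega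
  | succ g1 ih =>
    intro f2 v d h1 h2
    cases f2 with
    | zero => omega
    | succ g2 =>
      simp only [pvWin]
      split
      · rfl
      · refine congrArg (_ && ·) (pvAll_congr _ _ _ ?_)
        intro ch hch
        have := pvChildren_deck_lt hch
        rw [ih g2 ch.1 ch.2 (by omega) (by omega)]

-- === A's loops compute 'any child wins' over the children list ===

theorem pvAInner_some (rec : List (Int × Int) → List (Int × Int) → Int → Int)
    (visible deck : List (Int × Int)) (player : Int) (card : Int × Int) :
    ∀ sts ma ma' r, pvAInner rec visible deck player card sts ma = (ma', some r) →
      r = -player := by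
  intro sts
  induction sts with
  | nil => intro ma ma' r h; simp [pvAInner] at h
  | cons s rest ih =>
    intro ma ma' r h
    simp only [pvAInner] at h
    split at h
    · exact ih ma ma' r h
    · split at h
      · cases h; rfl
      · exact ih true ma' r h

theorem pvAOuter_some (rec : List (Int × Int) → List (Int × Int) → Int → Int)
    (visible deck : List (Int × Int)) (player : Int) :
    ∀ cards ma ma' r, pvAOuter rec visible deck player cards ma = (ma', some r) →
      r = -player := by
  intro cards
  induction cards with
  | nil => intro ma ma' r h; simp [pvAOuter] at h
  | cons c rest ih =>
    intro ma ma' r h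
    simp only [pvAOuter] at h
    cases hin : pvAInner rec visible deck player c visible ma with
    | mk ma2 o =>
      rw [hin] at h
      cases o with
      | some r2 =>
        have hr2 := pvAInner_some rec visible deck player c visible ma ma2 r2 hin
        simp only [Prod.mk.injEq, Option.some.injEq] at h
        rw [← h.2]
        exact hr2
      | none => exact ih ma2 ma' r h

theorem pvAGo_zero : ∀ fuel (v d : List (Int × Int)), pvAGo fuel v d 0 = 0 := by
  intro fuel v d
  cases fuel with
  | zero => simp [pvAGo]
  | succ g =>
    simp only [pvAGo]
    split
    · omega
    · cases h : pvAOuter (fun nv nd q => pvAGo g nv nd q) v d 0 d false with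
      | mk ma o =>
        cases o with
        | some r =>
          have hr := pvAOuter_some _ v d 0 d false ma r h
          show r = 0
          omega
        | none =>
          show (if ma = false then (-(0:Int)) else 0) = 0
          split <;> omega

theorem pvIsEmpty_append {α : Type} (a b : List α) :
    (a ++ b).isEmpty = (a.isEmpty && b.isEmpty) := by
  cases a <;> simp

-- one child for one (card, stack) pair, as pvChildren produces it
def pvChildAt (vis dk : List (Int × Int)) (c s : Int × Int) : PvPos :=
  (vis.map (fun x => if x = s then c else x), dk.filter (fun x => ¬ x = c))

-- A's inner loop computes 'any stack admits a winning child' over the child list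
theorem pvAInner_char (g : Nat) (visible deck : List (Int × Int)) (player : Int)
    (card : Int × Int) (hp : player ≠ 0)
    (hrec : ∀ nv nd q, pvAGo g nv nd q = if pvWin g nv nd then q else -q) :
    ∀ sts ma, pvAInner (fun nv nd q => pvAGo g nv nd q) visible deck player card sts ma =
      (if ((sts.filter (fun s => decide (s.2 = card.2 ∧ s.1 ≤ card.1))).map
            (pvChildAt visible deck card)).any (fun ch => pvWin g ch.1 ch.2)
       then (true, some (-player))
       else (ma || !((sts.filter (fun s => decide (s.2 = card.2 ∧ s.1 ≤ card.1))).map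
            (pvChildAt visible deck card)).isEmpty, none)) := by
  intro sts
  induction sts with
  | nil => intro ma; simp [pvAInner]
  | cons s rest ih =>
    intro ma
    by_cases hcond : s.2 = card.2 ∧ s.1 ≤ card.1
    · have hA : ¬(s.2 ≠ card.2 ∨ card.1 < s.1) := by
        obtain ⟨h1, h2⟩ := hcond; simp [h1]; omega
      have hd : (fun s => decide (s.2 = card.2 ∧ s.1 ≤ card.1)) s = true := by simp [hcond]
      simp only [pvAInner, if_neg hA]
      cases hw : pvWin g (visible.map (fun c => if c = s then card else c))
          (deck.filter (fun c => ¬ c = card)) with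
      | true =>
        have hres : pvAGo g (visible.map (fun c => if c = s then card else c))
            (deck.filter (fun c => ¬ c = card)) (-player) = -player := by
          rw [hrec, hw, if_pos rfl]
        rw [if_pos hres]
        have hwch : pvWin g (pvChildAt visible deck card s).1 (pvChildAt visible deck card s).2
            = true := hw
        have hfc : List.filter (fun t => decide (t.2 = card.2 ∧ t.1 ≤ card.1)) (s :: rest)
            = s :: List.filter (fun t => decide (t.2 = card.2 ∧ t.1 ≤ card.1)) rest := by
          simp [hcond]
        rw [hfc]
        simp only [List.map_cons, List.any_cons, hwch, Bool.true_or]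
        simp
      | false =>
        have hres : ¬(pvAGo g (visible.map (fun c => if c = s then card else c))
            (deck.filter (fun c => ¬ c = card)) (-player) = -player) := by
          rw [hrec, hw]
          simp only [Bool.false_eq_true, if_false]
          omega
        rw [if_neg hres, ih true]
        have hwch : pvWin g (pvChildAt visible deck card s).1 (pvChildAt visible deck card s).2
            = false := hw
        have hfc : List.filter (fun t => decide (t.2 = card.2 ∧ t.1 ≤ card.1)) (s :: rest)
            = s :: List.filter (fun t => decide (t.2 = card.2 ∧ t.1 ≤ card.1)) rest := by
          simp [hcond]
        rw [hfc]
        simp only [List.map_cons, List.any_cons, hwch, Bool.false_or, List.isEmpty_cons,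
          Bool.not_false, Bool.or_true, Bool.true_or]
    · have hA : s.2 ≠ card.2 ∨ card.1 < s.1 := by
        rcases not_and_or.mp hcond with h | h
        · exact Or.inl h
        · exact Or.inr (by omega)
      have hd : ¬((fun s => decide (s.2 = card.2 ∧ s.1 ≤ card.1)) s = true) := by
        simp [hcond]
      simp only [pvAInner, if_pos hA]
      have hfc : List.filter (fun t => decide (t.2 = card.2 ∧ t.1 ≤ card.1)) (s :: rest)
          = List.filter (fun t => decide (t.2 = card.2 ∧ t.1 ≤ card.1)) rest := by
        simp [hcond]
      rw [ih ma, hfc]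

-- A's outer loop computes 'any child wins' over the full children list
theorem pvAOuter_char (g : Nat) (visible deck : List (Int × Int)) (player : Int)
    (hp : player ≠ 0)
    (hrec : ∀ nv nd q, pvAGo g nv nd q = if pvWin g nv nd then q else -q) :
    ∀ cards ma, pvAOuter (fun nv nd q => pvAGo g nv nd q) visible deck player cards ma =
      (if (cards.flatMap (fun c =>
            (visible.filter (fun s => decide (s.2 = c.2 ∧ s.1 ≤ c.1))).map
              (pvChildAt visible deck c))).any (fun ch => pvWin g ch.1 ch.2)
       then (true, some (-player))
       else (ma || !(cards.flatMap (fun c =>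
            (visible.filter (fun s => decide (s.2 = c.2 ∧ s.1 ≤ c.1))).map
              (pvChildAt visible deck c))).isEmpty, none)) := by
  intro cards
  induction cards with
  | nil => intro ma; simp [pvAOuter]
  | cons c rest ih =>
    intro ma
    simp only [pvAOuter]
    rw [pvAInner_char g visible deck player c hp hrec visible ma]
    cases h1 : ((visible.filter (fun s => decide (s.2 = c.2 ∧ s.1 ≤ c.1))).map
        (pvChildAt visible deck c)).any (fun ch => pvWin g ch.1 ch.2) with
    | true =>
      rw [if_pos rfl]
      have h2 : ((c :: rest).flatMap (fun c =>
          (visible.filter (fun s => decide (s.2 = c.2 ∧ s.1 ≤ c.1))).map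
            (pvChildAt visible deck c))).any (fun ch => pvWin g ch.1 ch.2) = true := by
        rw [List.flatMap_cons, List.any_append, h1, Bool.true_or]
      rw [if_pos h2]
    | false =>
      rw [if_neg Bool.false_ne_true]
      refine (ih _).trans ?_
      rw [List.flatMap_cons, List.any_append, h1, Bool.false_or, pvIsEmpty_append]
      split
      · rfl
      · simp only [Bool.not_and, Bool.or_assoc]

-- the children list A scans is exactly pvChildren
theorem pvChildren_eq (visible deck : List (Int × Int)) :
    deck.flatMap (fun c =>
      (visible.filter (fun s => decide (s.2 = c.2 ∧ s.1 ≤ c.1))).map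
        (pvChildAt visible deck c)) = pvChildren visible deck := rfl

-- A's value is the pure boolean game value mapped to ±player
theorem pvAGo_pure : ∀ fuel (v d : List (Int × Int)) (p : Int),
    pvAGo fuel v d p = if pvWin fuel v d then p else -p := by
  intro fuel
  induction fuel with
  | zero => intro v d p; simp [pvAGo, pvWin]
  | succ g ih =>
    intro v d p
    by_cases hp : p = 0
    · subst hp
      rw [pvAGo_zero]
      split <;> omega
    · simp only [pvAGo, pvWin]
      split
      · simp
      · rw [pvAOuter_char g v d p hp ih d false, pvChildren_eq]
        by_cases hany : (pvChildren v d).any (fun ch => pvWin g ch.1 ch.2) = true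
        · rw [if_pos hany]
          have hall : (pvChildren v d).all (fun ch => !pvWin g ch.1 ch.2) = false := by
            rcases List.any_eq_true.mp hany with ⟨ch, hm, hw⟩
            exact List.all_eq_false.mpr ⟨ch, hm, by simp [hw]⟩
          simp [hall]
        · have hany' : (pvChildren v d).any (fun ch => pvWin g ch.1 ch.2) = false := by
            simpa using hany
          rw [if_neg hany]
          have hall : (pvChildren v d).all (fun ch => !pvWin g ch.1 ch.2) = true := by
            rw [List.all_eq_true]
            intro ch hm
            have := List.any_eq_false.mp hany' ch hm
            simp [this]
          cases he : (pvChildren v d).isEmpty with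
          | true => simp [hall]
          | false => simp [hall]

-- === memo side: every stored boolean is the true game value of its position ===
def pvGoodB (memo : PySem.Dict PvPos Bool) : Prop :=
  ∀ v d b, memo.get? (v, d) = some b → b = pvWin (d.length + 1) v d

theorem pvAllLose_sim (g : Nat)
    (hrec : ∀ (ch : PvPos) m, ch.2.length < g → pvGoodB m →
      (pvWinGo g ch.1 ch.2 m).1 = pvWin g ch.1 ch.2 ∧ pvGoodB (pvWinGo g ch.1 ch.2 m).2) :
    ∀ (l : List PvPos) m, (∀ ch ∈ l, ch.2.length < g) → pvGoodB m →
      (pvAllLose (fun ch mm => pvWinGo g ch.1 ch.2 mm) l m).1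
        = l.all (fun ch => !pvWin g ch.1 ch.2)
      ∧ pvGoodB (pvAllLose (fun ch mm => pvWinGo g ch.1 ch.2 mm) l m).2 := by
  intro l
  induction l with
  | nil => intro m _ hm; exact ⟨rfl, hm⟩
  | cons ch rest ih =>
    intro m hlen hm
    have h := hrec ch m (hlen ch (by simp)) hm
    simp only [pvAllLose, List.all_cons]
    rw [h.1]
    cases hw : pvWin g ch.1 ch.2 with
    | true =>
      rw [if_pos rfl]
      exact ⟨by simp, h.2⟩
    | false =>
      rw [if_neg (by simp)]
      have hrest := ih (pvWinGo g ch.1 ch.2 m).2 (fun x hx => hlen x (by simp [hx])) h.2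
      refine ⟨?_, hrest.2⟩
      rw [hrest.1]
      simp

theorem pvWinGo_sim : ∀ fuel (v d : List (Int × Int)) m, d.length < fuel → pvGoodB m →
    (pvWinGo fuel v d m).1 = pvWin fuel v d ∧ pvGoodB (pvWinGo fuel v d m).2 := by
  intro fuel
  induction fuel with
  | zero => intro v d m h _; omega
  | succ g ih =>
    intro v d m hf hm
    simp only [pvWinGo]
    split
    · rename_i hterm
      refine ⟨?_, hm⟩
      simp only [pvWin]
      rw [if_pos hterm]
    · rename_i hne
      cases hget : m.get? (v, d) with
      | some b =>
        refine ⟨hm v d b hget |>.trans ?_, hm⟩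
        exact pvWin_fuel (d.length + 1) (g + 1) v d (by omega) hf
      | none =>
        have hval : ∀ res : Bool, res = pvWin (d.length + 1) v d →
            ∀ m' : PySem.Dict PvPos Bool, pvGoodB m' → pvGoodB (m'.insert (v, d) res) := by
          intro res hres m' hg v' d' b' hb'
          rw [PySem.Dict.get?_insert] at hb'
          split at hb'
          · rename_i heq
            cases hb'
            simp only [Prod.mk.injEq] at heq
            obtain ⟨h1, h2⟩ := heq
            subst h1; subst h2
            exact hres
          · exact hg v' d' b' hb'
        have hwin : pvWin (g + 1) v d
            = (!(pvChildren v d).isEmpty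
                && (pvChildren v d).all (fun ch => !pvWin g ch.1 ch.2)) := by
          simp only [pvWin]
          rw [if_neg hne]
        have hfuel : pvWin (d.length + 1) v d = pvWin (g + 1) v d :=
          pvWin_fuel (d.length + 1) (g + 1) v d (by omega) hf
        cases he : (pvChildren v d).isEmpty with
        | true =>
          rw [if_pos rfl]
          refine ⟨?_, ?_⟩
          · rw [hwin, he]
            rfl
          · exact hval false (by rw [hfuel, hwin, he]; rfl) m hm
        | false =>
          rw [if_neg (by simp)]
          have hlen : ∀ ch ∈ pvChildren v d, ch.2.length < g := by
            intro ch hch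
            have := pvChildren_deck_lt hch
            omega
          have hsim := pvAllLose_sim g
            (fun ch mm hl hg => ih ch.1 ch.2 mm (by omega) hg)
            (pvChildren v d) m hlen hm
          have hv : (pvAllLose (fun ch mm => pvWinGo g ch.1 ch.2 mm) (pvChildren v d) m).1
              = pvWin (g + 1) v d := by
            rw [hsim.1, hwin, he]
            simp
          exact ⟨hv, hval _ (by rw [hfuel, hv]) _ hsim.2⟩

-- ===== VERDICT (by name: the statement is the Claim_ definition above) =====
theorem winner_worst_play_spec : Claim_equal_winner_worst_play := by
  intro visible deck player _
  unfold Spec_winner_worst_play winner_worst_play winner_worst_play_alt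
  have h := pvWinGo_sim (deck.length + 1) visible deck PySem.Dict.empty (by omega)
    (by intro v d b hb; simp [PySem.Dict.get?_empty] at hb)
  rw [h.1, pvAGo_pure]
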